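-- pv_equiv track=rewrite | github.com/TiredEspressoBean/TrackingNumberParsingAPI | app/parsers/base_parser.py | calculate_checksum_mod7
-- ===== SOURCE A (Python) =====
-- def calculate_checksum_mod7(tracking_number: list, check_digit: int, even_multiplier, odd_multiplier) -> bool:
--     """
--
--     :param tracking_number: List of ints to process as review the checksum
--     :param check_digit: Digit to check against the derived checksum
--     :param even_multiplier: Multiplier for digits in even positions.
--     :param odd_multiplier: Multiplier for digits in odd positions.
--     :return: True if the calculated check digit matches the expected check digit, False otherwise.
--     """
--     total = 0
--     for i, digit in enumerate(tracking_number):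
--         if i % 2 == 0:
--             total += even_multiplier * digit
--         else:
--             total += odd_multiplier * digit
--     calculated_check_digit = total % 7
--     return calculated_check_digit == check_digit
-- ===== SOURCE B (Python) =====
-- def calculate_checksum_mod7(tracking_number: list, check_digit: int, even_multiplier, odd_multiplier) -> bool:
--     total = 0
--     i = 0
--     n = len(tracking_number)
--     while i + 1 < n:
--         total += even_multiplier * tracking_number[i] + odd_multiplier * tracking_number[i + 1]
--         i += 2
--     if n % 2 == 1:
--         total += even_multiplier * tracking_number[n - 1]
--     return total % 7 == check_digit
-- ===== Notes on version B (the rewrite author's own statement) =====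
-- stated objective: alternative
-- what changed: Replaces the per-element enumerate loop with an if/else on index parity by a branch-free stride-2 loop that consumes a pair of digits per iteration plus one closing term for an odd-length tail.
import Mathlib
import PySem

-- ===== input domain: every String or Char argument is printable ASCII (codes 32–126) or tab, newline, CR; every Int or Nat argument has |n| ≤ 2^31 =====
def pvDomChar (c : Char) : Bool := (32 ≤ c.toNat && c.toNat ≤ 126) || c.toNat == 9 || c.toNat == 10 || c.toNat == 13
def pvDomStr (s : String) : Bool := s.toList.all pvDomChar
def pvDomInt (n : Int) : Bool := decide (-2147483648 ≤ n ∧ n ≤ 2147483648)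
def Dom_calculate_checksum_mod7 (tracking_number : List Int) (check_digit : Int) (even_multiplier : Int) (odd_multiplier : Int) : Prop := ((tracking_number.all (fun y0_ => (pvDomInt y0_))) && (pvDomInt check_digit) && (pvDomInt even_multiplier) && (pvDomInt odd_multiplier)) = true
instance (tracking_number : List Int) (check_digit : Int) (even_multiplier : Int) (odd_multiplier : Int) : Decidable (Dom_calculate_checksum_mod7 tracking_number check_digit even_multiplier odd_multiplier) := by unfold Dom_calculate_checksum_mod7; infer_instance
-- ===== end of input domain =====

-- B replaces A's per-element enumerate loop with a parity branch by a branch-free stride-2 pairwise loop plus one closing term for an odd tail (alternative decomposition, same O(n) cost; return-value equivalence proved).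


-- ===== PORT A =====
def calculate_checksum_mod7 (tracking_number : List Int) (check_digit : Int) (even_multiplier : Int) (odd_multiplier : Int) : Bool :=
  let total := (PySem.List.enumerate tracking_number 0).foldl
    (fun total p =>
      if PySem.Int.mod p.1 2 == 0 then total + even_multiplier * p.2
      else total + odd_multiplier * p.2) 0
  PySem.Int.mod total 7 == check_digit

-- ===== PORT B =====
-- the 'while i + 1 < n' loop of Source B (indices are always in range, so getD is exact)
def pvPairLoop (tn : List Int) (e o : Int) (n : Nat) (i : Nat) (total : Int) : Int :=
  if i + 1 < n then
    pvPairLoop tn e o n (i + 2) (total + e * tn.getD i 0 + o * tn.getD (i + 1) 0)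
  else total
termination_by n - i

def calculate_checksum_mod7_alt (tracking_number : List Int) (check_digit : Int) (even_multiplier : Int) (odd_multiplier : Int) : Bool :=
  let n := tracking_number.length
  let total := pvPairLoop tracking_number even_multiplier odd_multiplier n 0 0
  let total := if n % 2 == 1 then total + even_multiplier * tracking_number.getD (n - 1) 0 else total
  PySem.Int.mod total 7 == check_digit

-- ===== PRECONDITION & SPEC =====
def Spec_calculate_checksum_mod7 (tracking_number : List Int) (check_digit : Int) (even_multiplier : Int) (odd_multiplier : Int) (out : Bool) : Prop := out = calculate_checksum_mod7_alt tracking_number check_digit even_multiplier odd_multiplier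
instance (tracking_number : List Int) (check_digit : Int) (even_multiplier : Int) (odd_multiplier : Int) (out : Bool) : Decidable (Spec_calculate_checksum_mod7 tracking_number check_digit even_multiplier odd_multiplier out) := by unfold Spec_calculate_checksum_mod7; infer_instance

-- ===== CLAIM (what is proved, stated in full; the proofs are below) =====
def Claim_equal_calculate_checksum_mod7 : Prop := ∀ (tracking_number : List Int) (check_digit : Int) (even_multiplier : Int) (odd_multiplier : Int), Dom_calculate_checksum_mod7 tracking_number check_digit even_multiplier odd_multiplier → Spec_calculate_checksum_mod7 tracking_number check_digit even_multiplier odd_multiplier (calculate_checksum_mod7 tracking_number check_digit even_multiplier odd_multiplier)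

-- ===== LEMMAS AND PROOFS =====

-- weighted sum as A computes it, in structural pairwise form
def pvW (e o : Int) : List Int → Int
  | [] => 0
  | [x] => e * x
  | x :: y :: r => e * x + o * y + pvW e o r

-- sum of the complete pairs only (what B's loop accumulates)
def pvP (e o : Int) : List Int → Int
  | [] => 0
  | [_] => 0
  | x :: y :: r => e * x + o * y + pvP e o r

theorem foldA_eq (e o : Int) (xs : List Int) : ∀ (s acc : Int), PySem.Int.mod s 2 = 0 →
    (PySem.List.enumerate xs s).foldl
      (fun total p => if PySem.Int.mod p.1 2 == 0 then total + e * p.2 else total + o * p.2) acc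
    = acc + pvW e o xs := by
  induction xs using pvW.induct with
  | case1 =>
    intro s acc _h
    simp [PySem.List.enumerate_nil, pvW]
  | case2 x =>
    intro s acc h
    have hbs : (PySem.Int.mod s 2 == 0) = true := by rw [h]; rfl
    simp only [PySem.List.enumerate_cons, PySem.List.enumerate_nil, List.foldl_cons,
      List.foldl_nil, hbs, if_true, pvW]
  | case3 x y r ih =>
    intro s acc h
    have h2 : PySem.Int.mod s 2 = s % 2 := PySem.Int.mod_eq_emod_of_pos (by norm_num)
    have h2' : PySem.Int.mod (s + 1) 2 = (s + 1) % 2 := PySem.Int.mod_eq_emod_of_pos (by norm_num)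
    have h2'' : PySem.Int.mod (s + 1 + 1) 2 = (s + 1 + 1) % 2 := PySem.Int.mod_eq_emod_of_pos (by norm_num)
    rw [h2] at h
    have hbs : (PySem.Int.mod s 2 == 0) = true := by rw [h2]; simpa using h
    have hbs1 : (PySem.Int.mod (s + 1) 2 == 0) = false := by
      rw [h2']; simp only [beq_eq_false_iff_ne, ne_eq]; omega
    have hs2 : PySem.Int.mod (s + 1 + 1) 2 = 0 := by rw [h2'']; omega
    simp only [PySem.List.enumerate_cons, List.foldl_cons, hbs, hbs1, if_true,
      Bool.false_eq_true, if_false]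
    rw [ih (s + 1 + 1) _ hs2]
    simp only [pvW]
    ring

theorem pairLoop_eq (e o : Int) (tn : List Int) (l : List Int) : ∀ (i : Nat) (total : Int),
    tn.drop i = l →
    pvPairLoop tn e o tn.length i total = total + pvP e o l := by
  induction l using pvP.induct with
  | case1 =>
    intro i total hd
    have hlen : tn.length ≤ i := by
      have := congrArg List.length hd
      simp [List.length_drop] at this; omega
    rw [pvPairLoop, if_neg (by omega)]
    simp [pvP]
  | case2 x =>
    intro i total hd
    have hlen : tn.length = i + 1 := by
      have := congrArg List.length hd
      simp [List.length_drop] at this; omega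
    rw [pvPairLoop, if_neg (by omega)]
    simp [pvP]
  | case3 x y r ih =>
    intro i total hd
    have hlen : tn.length = i + 2 + r.length := by
      have := congrArg List.length hd
      simp [List.length_drop] at this; omega
    have hx : tn[i]? = some x := by
      have : (tn.drop i)[0]? = some x := by rw [hd]; rfl
      simpa using this
    have hy : tn[i + 1]? = some y := by
      have : (tn.drop i)[1]? = some y := by rw [hd]; rfl
      simpa using this
    have hr : tn.drop (i + 2) = r := by
      have : (tn.drop i).drop 2 = r := by rw [hd]; rfl
      rwa [List.drop_drop] at this
    rw [pvPairLoop, if_pos (by omega)]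
    rw [List.getD_eq_getElem?_getD, List.getD_eq_getElem?_getD, hx, hy]
    rw [ih (i + 2) _ hr]
    simp [pvP]
    ring

theorem pvW_eq_pvP (e o : Int) (xs : List Int) :
    pvW e o xs = pvP e o xs +
      (if xs.length % 2 == 1 then e * xs.getD (xs.length - 1) 0 else 0) := by
  induction xs using pvW.induct with
  | case1 => simp [pvW, pvP]
  | case2 x => simp [pvW, pvP]
  | case3 x y r ih =>
    simp only [pvW, pvP, List.length_cons]
    by_cases hodd : r.length % 2 = 1
    · obtain ⟨m, hm⟩ : ∃ m, r.length = m + 1 := ⟨r.length - 1, by omega⟩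
      rw [ih]
      simp only [hm]
      have c1 : (m + 1) % 2 = 1 := by omega
      have c2 : (m + 1 + 1 + 1) % 2 = 1 := by omega
      simp only [beq_iff_eq]
      rw [if_pos c1, if_pos c2]
      have e2 : m + 1 + 1 + 1 - 1 = m + 1 + 1 := by omega
      rw [show m + 1 - 1 = m from rfl, e2, List.getD_cons_succ, List.getD_cons_succ]
      ring
    · rw [ih]
      have c1 : ¬ (r.length % 2 = 1) := hodd
      have c2 : ¬ ((r.length + 1 + 1) % 2 = 1) := by omega
      simp [c1, c2]

-- ===== VERDICT (by name: the statement is the Claim_ definition above) =====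
theorem calculate_checksum_mod7_spec : Claim_equal_calculate_checksum_mod7 := by
  intro tn cd e o _hdom
  unfold Spec_calculate_checksum_mod7 calculate_checksum_mod7 calculate_checksum_mod7_alt
  have hA := foldA_eq e o tn 0 0 (by decide)
  have hB := pairLoop_eq e o tn tn 0 0 (by simp)
  simp only [hA, hB, zero_add]
  rw [pvW_eq_pvP]
  by_cases hodd : tn.length % 2 = 1
  · simp [hodd]
  · simp [hodd]
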